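-- pv_equiv track=rewrite | github.com/LiTing99-cutie/sORFs | 02-Mass-spec-20250723/analysis/20250910_c8_protein_map/scripts/calcu_peri/psite_frame_stats.v1.py | build_orf_segments
-- ===== SOURCE A (Python) =====
-- from collections import defaultdict, namedtuple
--
-- Segment = namedtuple("Segment", "chrom start end strand cds_offset")  # [start,end)
--
-- def build_orf_segments(cds_by_tid):
--     """为每个ORF构建按转录本方向排序并带cds_offset的段列表"""
--     orf2segs = {}         # tid -> [Segment,...]（转录本方向排序）
--     tid2len = {}          # tid -> CDS总长nt
--     for tid, blocks in cds_by_tid.items():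
--         if not blocks: continue
--         strands = {b[3] for b in blocks}
--         if len(strands) != 1:  # 异常跳过
--             continue
--         strand = list(strands)[0]
--         blocks_sorted = sorted(blocks, key=lambda x: x[1], reverse=(strand=="-"))
--         offset = 0
--         segs = []
--         total = 0
--         for chrom, s, e, _ in blocks_sorted:
--             segs.append(Segment(chrom, s, e, strand, offset))
--             l = e - s
--             offset += l
--             total += l
--         orf2segs[tid] = segs
--         tid2len[tid] = total
--     return orf2segs, tid2len
-- ===== SOURCE B (Python) =====
-- from collections import namedtuple
--
-- Segment = namedtuple("Segment", "chrom start end strand cds_offset")  # [start,end)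
--
-- def build_orf_segments(cds_by_tid):
--     """Same result, different decomposition: no running accumulator at all —
--     each block's cds_offset is recomputed directly as the sum of the lengths
--     of the blocks that precede it in the sorted order, and the total length
--     is taken from the unsorted blocks (order-independent)."""
--     orf2segs = {}
--     tid2len = {}
--     for tid, blocks in cds_by_tid.items():
--         if not blocks:
--             continue
--         strand = blocks[0][3]
--         if any(b[3] != strand for b in blocks):
--             continue
--         ordered = sorted(blocks, key=lambda b: b[1], reverse=(strand == "-"))
--         orf2segs[tid] = [
--             Segment(c, s, e, strand, sum(ee - ss for _, ss, ee, _ in ordered[:i]))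
--             for i, (c, s, e, _) in enumerate(ordered)
--         ]
--         tid2len[tid] = sum(e - s for _, s, e, _ in blocks)
--     return orf2segs, tid2len
-- ===== Notes on version B (the rewrite author's own statement) =====
-- stated objective: alternative
-- what changed: The running-state loop (segs/offset/total mutated per block) is gone: each block's cds_offset is recomputed independently as sum of lengths of the blocks preceding it in the sorted order (enumerate + slice), the total length is computed from the unsorted blocks since it is order-independent, and the strand-uniformity check is an any() scan against the first block instead of building a set.
import Mathlib
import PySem

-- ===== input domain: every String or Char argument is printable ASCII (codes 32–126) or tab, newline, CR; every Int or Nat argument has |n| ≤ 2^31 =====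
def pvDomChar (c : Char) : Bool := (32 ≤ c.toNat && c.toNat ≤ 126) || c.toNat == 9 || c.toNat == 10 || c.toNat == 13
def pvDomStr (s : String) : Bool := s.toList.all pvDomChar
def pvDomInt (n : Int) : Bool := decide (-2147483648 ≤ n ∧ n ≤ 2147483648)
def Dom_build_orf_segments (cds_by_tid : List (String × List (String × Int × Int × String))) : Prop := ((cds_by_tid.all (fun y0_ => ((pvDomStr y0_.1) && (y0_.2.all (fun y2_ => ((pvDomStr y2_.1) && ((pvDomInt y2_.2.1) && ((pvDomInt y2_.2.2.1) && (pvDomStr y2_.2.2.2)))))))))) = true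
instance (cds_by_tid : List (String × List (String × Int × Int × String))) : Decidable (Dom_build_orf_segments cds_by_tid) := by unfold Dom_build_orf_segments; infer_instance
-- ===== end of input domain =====

-- B removes A's running accumulator: each segment's cds_offset is recomputed as the sum of
-- the lengths of the blocks preceding it in the sorted order, and the total length is taken
-- from the unsorted blocks (alternative decomposition; not faster).

-- ===== PORT A =====
-- A's per-transcript inner loop: state (segs, offset, total)
def pvStepA (strand : String) (st : List (String × Int × Int × String × Int) × Int × Int)
    (b : String × Int × Int × String) : List (String × Int × Int × String × Int) × Int × Int :=
  (st.1 ++ [(b.1, b.2.1, b.2.2.1, strand, st.2.1)],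
   st.2.1 + (b.2.2.1 - b.2.1), st.2.2 + (b.2.2.1 - b.2.1))

def build_orf_segments (cds_by_tid : List (String × List (String × Int × Int × String))) : (List (String × List (String × Int × Int × String × Int))) × (List (String × Int)) :=
  let r := cds_by_tid.foldl
    (fun (acc : PySem.Dict String (List (String × Int × Int × String × Int)) × PySem.Dict String Int) p =>
      let tid := p.1
      let blocks := p.2
      if blocks.isEmpty then acc else
      let strands : PySem.Set String := PySem.Set.ofList (blocks.map (fun b => b.2.2.2))
      if strands.length ≠ 1 then acc else
      let strand := strands.headI
      let blocks_sorted := PySem.List.sorted blocks (fun x => x.2.1) (strand == "-")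
      let st := blocks_sorted.foldl (pvStepA strand) ([], 0, 0)
      (acc.1.insert tid st.1, acc.2.insert tid st.2.2))
    (PySem.Dict.empty, PySem.Dict.empty)
  (r.1.items, r.2.items)

-- ===== PORT B =====
def build_orf_segments_alt (cds_by_tid : List (String × List (String × Int × Int × String))) : (List (String × List (String × Int × Int × String × Int))) × (List (String × Int)) :=
  let r := cds_by_tid.foldl
    (fun (acc : PySem.Dict String (List (String × Int × Int × String × Int)) × PySem.Dict String Int) p =>
      let tid := p.1
      match p.2 with
      | [] => acc
      | b0 :: rest =>
        let blocks := b0 :: rest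
        let strand := b0.2.2.2
        if blocks.any (fun b => b.2.2.2 ≠ strand) then acc else
        let ordered := PySem.List.sorted blocks (fun x => x.2.1) (strand == "-")
        -- ordered[:i] with 0 ≤ i is PySem.List.slice ordered (some 0) (some i)
        let segs := (PySem.List.enumerate ordered).map (fun q =>
          (q.2.1, q.2.2.1, q.2.2.2.1, strand,
           ((PySem.List.slice ordered (some 0) (some q.1)).map (fun b => b.2.2.1 - b.2.1)).sum))
        (acc.1.insert tid segs, acc.2.insert tid ((blocks.map (fun b => b.2.2.1 - b.2.1)).sum)))
    (PySem.Dict.empty, PySem.Dict.empty)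
  (r.1.items, r.2.items)

-- ===== PRECONDITION & SPEC =====
def Spec_build_orf_segments (cds_by_tid : List (String × List (String × Int × Int × String))) (out : (List (String × List (String × Int × Int × String × Int))) × (List (String × Int))) : Prop := out = build_orf_segments_alt cds_by_tid
instance (cds_by_tid : List (String × List (String × Int × Int × String))) (out : (List (String × List (String × Int × Int × String × Int))) × (List (String × Int))) : Decidable (Spec_build_orf_segments cds_by_tid out) := by
  unfold Spec_build_orf_segments
  letI h1 : DecidableEq (List (String × Int × Int × String × Int)) := inferInstance
  letI h2 : DecidableEq (String × List (String × Int × Int × String × Int)) := instDecidableEqProd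
  letI h3 : DecidableEq (List (String × List (String × Int × Int × String × Int))) := instDecidableEqList
  letI h4 : DecidableEq ((List (String × List (String × Int × Int × String × Int))) × (List (String × Int))) := instDecidableEqProd
  exact h4 out (build_orf_segments_alt cds_by_tid)

-- ===== CLAIM (what is proved, stated in full; the proofs are below) =====
def Claim_equal_build_orf_segments : Prop := ∀ (cds_by_tid : List (String × List (String × Int × Int × String))), Dom_build_orf_segments cds_by_tid → Spec_build_orf_segments cds_by_tid (build_orf_segments cds_by_tid)

-- ===== LEMMAS AND PROOFS =====

theorem pv_foldl_add_single {x : String} : ∀ {xs : List String}, (∀ y ∈ xs, y = x) →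
    xs.foldl PySem.Set.add [x] = [x] := by
  intro xs
  induction xs with
  | nil => intro _; rfl
  | cons y ys ih =>
    intro h
    have hy : y = x := h y (by simp)
    subst hy
    simp only [List.foldl_cons]
    have : PySem.Set.add [y] y = [y] := by simp [PySem.Set.add, PySem.Set.contains]
    rw [this]
    exact ih (fun z hz => h z (by simp [hz]))

-- a one-element Python set: all later occurrences equal the head
theorem pv_ofList_single {x : String} {xs : List String} (h : ∀ y ∈ xs, y = x) :
    PySem.Set.ofList (x :: xs) = [x] := by
  rw [PySem.Set.ofList_eq_foldl]
  simp only [List.foldl_cons]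
  have : PySem.Set.add [] x = [x] := by simp [PySem.Set.add, PySem.Set.contains]
  rw [this]
  exact pv_foldl_add_single h

theorem pv_ofList_len_ne_one {x : String} {xs : List String} (h : ¬ ∀ y ∈ xs, y = x) :
    (PySem.Set.ofList (x :: xs)).length ≠ 1 := by
  intro hlen
  obtain ⟨a, ha⟩ := List.length_eq_one_iff.mp hlen
  apply h
  intro y hy
  have h1 : y ∈ PySem.Set.ofList (x :: xs) := by
    rw [PySem.Set.mem_ofList]; simp [hy]
  have h2 : x ∈ PySem.Set.ofList (x :: xs) := by
    rw [PySem.Set.mem_ofList]; simp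
  rw [ha] at h1 h2
  simp at h1 h2
  rw [h1, h2]

theorem pv_scanl_ne_nil {f : Int → Int → Int} {a : Int} {l : List Int} :
    List.scanl f a l ≠ [] := by
  cases l <;> simp [List.scanl]

-- A's running accumulator in prefix-table form (intermediate characterisation)
theorem pv_inner (strand : String) (bs : List (String × Int × Int × String)) :
    ∀ (segs : List (String × Int × Int × String × Int)) (off tot : Int),
    bs.foldl (pvStepA strand) (segs, off, tot) =
      (segs ++ ((bs.zip (((bs.map (fun b => b.2.2.1 - b.2.1)).scanl (· + ·) off).dropLast)).map
          (fun q => (q.1.1, q.1.2.1, q.1.2.2.1, strand, q.2))),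
       off + (bs.map (fun b => b.2.2.1 - b.2.1)).sum,
       tot + (bs.map (fun b => b.2.2.1 - b.2.1)).sum) := by
  induction bs with
  | nil => intro segs off tot; simp
  | cons b t ih =>
    intro segs off tot
    simp only [List.foldl_cons, List.map_cons, List.scanl_cons, List.sum_cons]
    rw [List.dropLast_cons_of_ne_nil pv_scanl_ne_nil]
    simp only [List.zip_cons_cons, List.map_cons]
    rw [show pvStepA strand (segs, off, tot) b =
        (segs ++ [(b.1, b.2.1, b.2.2.1, strand, off)],
         off + (b.2.2.1 - b.2.1), tot + (b.2.2.1 - b.2.1)) from rfl]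
    rw [ih]
    simp [List.append_assoc]
    constructor <;> ring

-- the k-th running prefix sum is the sum of the first k elements
theorem pv_scanl_get : ∀ (l : List Int) (a : Int) (k : Nat) (h : k < (List.scanl (· + ·) a l).length),
    (List.scanl (· + ·) a l)[k] = a + (l.take k).sum := by
  intro l
  induction l with
  | nil =>
    intro a k h
    simp only [List.length_scanl, List.length_nil] at h
    have hk0 : k = 0 := by omega
    subst hk0
    simp [List.scanl]
  | cons x t ih =>
    intro a k h
    cases k with
    | zero => simp [List.scanl]
    | succ k =>
      simp only [List.scanl_cons, List.getElem_cons_succ, List.take_succ_cons, List.sum_cons]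
      rw [ih (a + x) k (by simpa [List.length_scanl] using h)]
      ring

-- B's enumerate/slice comprehension equals the zip/prefix-table form used above
theorem pv_segs_eq (strand : String) (bs : List (String × Int × Int × String)) :
    (PySem.List.enumerate bs).map (fun q =>
      (q.2.1, q.2.2.1, q.2.2.2.1, strand,
       ((PySem.List.slice bs (some 0) (some q.1)).map (fun b => b.2.2.1 - b.2.1)).sum)) =
    (bs.zip (((bs.map (fun b => b.2.2.1 - b.2.1)).scanl (· + ·) 0).dropLast)).map
        (fun q => (q.1.1, q.1.2.1, q.1.2.2.1, strand, q.2)) := by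
  apply List.ext_getElem
  · simp [PySem.List.length_enumerate, List.length_scanl]
  · intro k h1 h2
    have hk : k < bs.length := by
      simpa [PySem.List.length_enumerate] using h1
    have hd : k < (List.scanl (· + ·) 0 (bs.map (fun b => b.2.2.1 - b.2.1))).length := by
      simp [List.length_scanl]; omega
    simp only [List.getElem_map, PySem.List.getElem_enumerate, List.getElem_zip, zero_add]
    rw [show PySem.List.slice bs (some 0) (some ((k : Nat) : Int)) = bs.take k from by
          rw [PySem.List.slice_zero_start]; exact PySem.List.slice_to_natCast bs k]
    rw [List.getElem_dropLast, pv_scanl_get _ 0 k hd, zero_add, List.map_take]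

-- the per-transcript step functions of the two ports agree
theorem pv_step_eq
    (acc : PySem.Dict String (List (String × Int × Int × String × Int)) × PySem.Dict String Int)
    (p : String × List (String × Int × Int × String)) :
    (fun (acc : PySem.Dict String (List (String × Int × Int × String × Int)) × PySem.Dict String Int) p =>
      let tid := p.1
      let blocks := p.2
      if blocks.isEmpty then acc else
      let strands : PySem.Set String := PySem.Set.ofList (blocks.map (fun b => b.2.2.2))
      if strands.length ≠ 1 then acc else
      let strand := strands.headI
      let blocks_sorted := PySem.List.sorted blocks (fun x => x.2.1) (strand == "-")
      let st := blocks_sorted.foldl (pvStepA strand) ([], 0, 0)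
      (acc.1.insert tid st.1, acc.2.insert tid st.2.2)) acc p =
    (fun (acc : PySem.Dict String (List (String × Int × Int × String × Int)) × PySem.Dict String Int) p =>
      let tid := p.1
      match p.2 with
      | [] => acc
      | b0 :: rest =>
        let blocks := b0 :: rest
        let strand := b0.2.2.2
        if blocks.any (fun b => b.2.2.2 ≠ strand) then acc else
        let ordered := PySem.List.sorted blocks (fun x => x.2.1) (strand == "-")
        let segs := (PySem.List.enumerate ordered).map (fun q =>
          (q.2.1, q.2.2.1, q.2.2.2.1, strand,
           ((PySem.List.slice ordered (some 0) (some q.1)).map (fun b => b.2.2.1 - b.2.1)).sum))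
        (acc.1.insert tid segs, acc.2.insert tid ((blocks.map (fun b => b.2.2.1 - b.2.1)).sum))) acc p := by
  obtain ⟨tid, blocks⟩ := p
  cases blocks with
  | nil => rfl
  | cons b0 rest =>
    simp only [List.isEmpty_cons, Bool.false_eq_true, if_false, List.map_cons]
    by_cases hall : ∀ b ∈ rest, b.2.2.2 = b0.2.2.2
    · have hset : PySem.Set.ofList (b0.2.2.2 :: rest.map (fun b => b.2.2.2)) = [b0.2.2.2] :=
        pv_ofList_single (by
          intro y hy
          obtain ⟨b, hb, rfl⟩ := List.mem_map.mp hy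
          exact hall b hb)
      have hany : (b0 :: rest).any (fun b => decide (b.2.2.2 ≠ b0.2.2.2)) = false := by
        simp only [List.any_eq_false, decide_eq_true_eq, not_not]
        intro b hb
        rcases List.mem_cons.mp hb with h | h
        · rw [h]
        · exact hall b h
      rw [hset]
      simp only [List.length_cons, List.length_nil, ne_eq, not_true_eq_false, if_false,
        List.headI_cons, hany, Bool.false_eq_true, if_false]
      rw [pv_inner, pv_segs_eq]
      have hperm : (PySem.List.sorted (b0 :: rest) (fun x => x.2.1)
            (b0.2.2.2 == "-")).Perm (b0 :: rest) :=
        PySem.List.sorted_perm _ _ _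
      have hsum : ((PySem.List.sorted (b0 :: rest) (fun x => x.2.1)
            (b0.2.2.2 == "-")).map (fun b => b.2.2.1 - b.2.1)).sum =
          ((b0 :: rest).map (fun b => b.2.2.1 - b.2.1)).sum :=
        (hperm.map (fun b => b.2.2.1 - b.2.1)).sum_eq
      simp [hsum]
    · have hne : (PySem.Set.ofList (b0.2.2.2 :: rest.map (fun b => b.2.2.2))).length ≠ 1 :=
        pv_ofList_len_ne_one (by
          intro hc
          apply hall
          intro b hb
          exact hc b.2.2.2 (List.mem_map.mpr ⟨b, hb, rfl⟩))
      simp [hne]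
      intro hc
      exact absurd (fun (b : String × Int × Int × String) hb =>
        hc b.1 b.2.1 b.2.2.1 b.2.2.2 (by simpa using hb)) hall

-- ===== VERDICT (by name: the statement is the Claim_ definition above) =====
theorem build_orf_segments_spec : Claim_equal_build_orf_segments := by
  intro l _
  unfold Spec_build_orf_segments build_orf_segments build_orf_segments_alt
  rw [funext₂ pv_step_eq]
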